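-- pv_equiv track=rewrite | github.com/dielfrag13/snippets | python/design/robot_vacuum_project/rooms.py | spiral_room
-- ===== SOURCE A (Python) =====
-- from typing import Dict, List, Optional, Tuple
--
-- Grid = List[List[str]]
--
-- def spiral_room(size: int = 11) -> Grid:
--     """Create a spiral-shaped open path inside walls.
--
--     size: outer dimension (will be made odd if necessary).
--     """
--     n = max(5, size)
--     if n % 2 == 0:
--         n += 1
--     grid = [["#" for _ in range(n)] for _ in range(n)]
--     # carve a spiral path
--     r = c = 1
--     dr, dc = 0, 1
--     steps = n - 2
--     while steps > 0:
--         for _ in range(steps):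
--             grid[r][c] = "."
--             r += dr
--             c += dc
--         # step back
--         r -= dr
--         c -= dc
--         # turn right
--         dr, dc = dc, -dr
--         r += dr
--         c += dc
--         if dc == 0:
--             steps -= 1
--     grid[1][1] = "."
--     return grid
-- ===== SOURCE B (Python) =====
-- def spiral_room(size: int = 11):
--     """Create a spiral-shaped open path inside walls.
--
--     The spiral carved by the original visits every interior cell, so the
--     result is simply a '#' border around an all-'.' interior.
--     """
--     n = max(5, size)
--     if n % 2 == 0:
--         n += 1
--     wall = ["#"] * n
--     inner = ["#"] + ["."] * (n - 2) + ["#"]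
--     return [wall[:]] + [inner[:] for _ in range(n - 2)] + [wall[:]]
-- ===== Notes on version B (the rewrite author's own statement) =====
-- stated objective: simpler
-- what changed: Replaces the direction-turning spiral walk (mutating the grid cell by cell) with direct construction: the spiral visits every interior cell, so the result is just a '#' border around an all-'.' interior, built from whole rows.
import Mathlib
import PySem

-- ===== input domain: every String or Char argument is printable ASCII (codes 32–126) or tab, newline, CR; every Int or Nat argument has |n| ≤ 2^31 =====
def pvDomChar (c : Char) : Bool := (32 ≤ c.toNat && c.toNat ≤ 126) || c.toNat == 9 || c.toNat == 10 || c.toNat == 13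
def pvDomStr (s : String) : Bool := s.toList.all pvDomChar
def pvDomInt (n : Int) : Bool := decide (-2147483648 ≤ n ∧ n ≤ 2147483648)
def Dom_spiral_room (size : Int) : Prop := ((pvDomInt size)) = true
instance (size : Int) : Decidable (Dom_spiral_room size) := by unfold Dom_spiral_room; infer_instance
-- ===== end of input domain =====

-- B replaces A's cell-by-cell spiral walk by a direct construction ('#' border around an all-'.' interior, which is what the spiral carves).

-- ===== PORT A =====

-- grid[r][c] = v (exact for in-range r, c; Python raises IndexError outside, which this program never does)
def set2 (g : List (List String)) (r c : Int) (v : String) : List (List String) :=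
  PySem.List.pySetD g r (PySem.List.pySetD (PySem.List.pyGetD g r []) c v)

-- the inner 'for _ in range(steps)' walk: paints the cell and moves; returns (grid, r, c)
def spiralSeg : Nat → List (List String) → Int → Int → Int → Int → List (List String) × Int × Int
  | 0, g, r, c, _, _ => (g, r, c)
  | k+1, g, r, c, dr, dc => spiralSeg k (set2 g r c ".") (r + dr) (c + dc) dr dc

-- the 'while steps > 0' loop; fuel bounds the number of iterations (2*n suffices)
def spiralLoop : Nat → List (List String) → Int → Int → Int → Int → Int → List (List String)
  | 0, g, _, _, _, _, _ => g
  | fuel+1, g, r, c, dr, dc, steps =>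
    if steps > 0 then
      match spiralSeg steps.toNat g r c dr dc with
      | (g, r, c) =>
        let r := r - dr
        let c := c - dc
        let dr' := dc
        let dc' := -dr
        let r := r + dr'
        let c := c + dc'
        let steps := if dc' == 0 then steps - 1 else steps
        spiralLoop fuel g r c dr' dc' steps
    else g

def spiral_room (size : Int) : List (List String) :=
  let n0 := max 5 size
  let n := if PySem.Int.mod n0 2 == 0 then n0 + 1 else n0
  let g0 := List.replicate n.toNat (List.replicate n.toNat "#")
  let g1 := spiralLoop (2 * n).toNat g0 1 1 0 1 (n - 2)
  set2 g1 1 1 "."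

-- ===== PORT B =====
def spiral_room_alt (size : Int) : List (List String) :=
  let n0 := max 5 size
  let n := if PySem.Int.mod n0 2 == 0 then n0 + 1 else n0
  let wall := List.replicate n.toNat "#"
  let inner := "#" :: (List.replicate (n - 2).toNat "." ++ ["#"])
  wall :: (List.replicate (n - 2).toNat inner ++ [wall])

-- ===== PRECONDITION & SPEC =====
def Spec_spiral_room (size : Int) (out : List (List String)) : Prop := out = spiral_room_alt size
instance (size : Int) (out : List (List String)) : Decidable (Spec_spiral_room size out) := by unfold Spec_spiral_room; infer_instance

-- ===== CLAIM (what is proved, stated in full; the proofs are below) =====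
def Claim_equal_spiral_room : Prop := ∀ (size : Int), Dom_spiral_room size → Spec_spiral_room size (spiral_room size)

-- ===== LEMMAS AND PROOFS =====

-- cell lookup used for extensional reasoning
def lookup (g : List (List String)) (i j : Nat) : Option String :=
  g[i]? >>= fun row => row[j]?

-- abstract cell lists
def paint (g : List (List String)) (p : Int × Int) : List (List String) :=
  set2 g p.1 p.2 "."

def segCells (r c dr dc : Int) (k : Nat) : List (Int × Int) :=
  (List.range k).map (fun (t : Nat) => (r + (t : Int) * dr, c + (t : Int) * dc))

def spiralCells : Int → Int → Nat → List (Int × Int)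
  | _, _, 0 => []
  | r, c, 1 => [(r, c)]
  | r, c, (m+2) =>
      segCells r c 0 1 (m+2) ++
      segCells (r+1) (c+(m+2)-1) 1 0 (m+1) ++
      segCells (r+(m+2)-1) (c+(m+2)-2) 0 (-1) (m+1) ++
      segCells (r+(m+2)-2) c (-1) 0 m ++
      spiralCells (r+1) (c+1) m

def Shape (g : List (List String)) (N : Nat) : Prop :=
  g.length = N ∧ ∀ row ∈ g, row.length = N

lemma set2_eq (g : List (List String)) (r c : Int) (v : String)
    (hr0 : 0 ≤ r) (hr : r.toNat < g.length) (hc0 : 0 ≤ c) :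
    set2 g r c v = g.set r.toNat ((g[r.toNat]).set c.toNat v) := by
  rw [set2, PySem.List.pySetD_of_nonneg _ _ hr0, PySem.List.pySetD_of_nonneg _ _ hc0,
      PySem.List.pyGetD_eq_getElem _ _ hr0 (by omega)]

lemma shape_set2 (g : List (List String)) (N : Nat) (r c : Int) (v : String)
    (h : Shape g N) (hr0 : 0 ≤ r) (hr : r < (N:Int)) (hc0 : 0 ≤ c) :
    Shape (set2 g r c v) N := by
  have hlen := h.1
  have hrl : r.toNat < g.length := by omega
  rw [set2_eq g r c v hr0 hrl hc0]
  refine ⟨by simpa using h.1, ?_⟩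
  intro row hrow
  rcases List.mem_or_eq_of_mem_set hrow with hm | he
  · exact h.2 row hm
  · rw [he, List.length_set]
    exact h.2 _ (List.getElem_mem _)

lemma lookup_set2 (g : List (List String)) (N : Nat) (r c : Int) (v : String) (i j : Nat)
    (h : Shape g N) (hr0 : 0 ≤ r) (hr : r < (N:Int)) (hc0 : 0 ≤ c) (hc : c < (N:Int)) :
    lookup (set2 g r c v) i j =
      if (i:Int) = r ∧ (j:Int) = c then some v else lookup g i j := by
  have hlen := h.1
  have hrl : r.toNat < g.length := by omega
  rw [set2_eq g r c v hr0 hrl hc0]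
  have hrowlen : (g[r.toNat]).length = N := h.2 _ (List.getElem_mem _)
  unfold lookup
  rw [List.getElem?_set]
  by_cases hi : r.toNat = i
  · subst hi
    rw [if_pos rfl, if_pos hrl]
    show ((g[r.toNat].set c.toNat v)[j]? ) = _
    rw [List.getElem?_set]
    by_cases hj : c.toNat = j
    · subst hj
      rw [if_pos rfl, if_pos (by omega), if_pos (by omega)]
    · rw [if_neg hj, if_neg (by omega), List.getElem?_eq_getElem hrl]
      show _ = (g[r.toNat])[j]?
      rfl
  · rw [if_neg hi, if_neg (by omega)]

lemma shape_foldl_paint (g : List (List String)) (N : Nat) (cells : List (Int × Int))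
    (h : Shape g N)
    (hc : ∀ p ∈ cells, 0 ≤ p.1 ∧ p.1 < (N:Int) ∧ 0 ≤ p.2 ∧ p.2 < (N:Int)) :
    Shape (List.foldl paint g cells) N := by
  induction cells generalizing g with
  | nil => simpa using h
  | cons p cells ih =>
    have hp := hc p (by simp)
    exact ih (paint g p)
      (shape_set2 g N p.1 p.2 "." h hp.1 hp.2.1 hp.2.2.1)
      (fun q hq => hc q (by simp [hq]))

lemma lookup_foldl_paint (cells : List (Int × Int)) (g : List (List String)) (N : Nat) (i j : Nat)
    (h : Shape g N) (hc : ∀ p ∈ cells, 0 ≤ p.1 ∧ p.1 < (N:Int) ∧ 0 ≤ p.2 ∧ p.2 < (N:Int)) :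
    lookup (List.foldl paint g cells) i j =
      if ((i:Int), (j:Int)) ∈ cells then some "." else lookup g i j := by
  induction cells generalizing g with
  | nil => simp
  | cons p cells ih =>
    have hp := hc p (by simp)
    have hsh := shape_set2 g N p.1 p.2 "." h hp.1 hp.2.1 hp.2.2.1
    rw [List.foldl_cons,
        ih (paint g p) hsh (fun q hq => hc q (by simp [hq]))]
    rw [show paint g p = set2 g p.1 p.2 "." from rfl,
        lookup_set2 g N p.1 p.2 "." i j h hp.1 hp.2.1 hp.2.2.1 hp.2.2.2]
    by_cases hm : ((i:Int), (j:Int)) ∈ cells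
    · simp [hm]
    · by_cases he : ((i:Int), (j:Int)) = p
      · simp [hm, ← he]
      · have : ¬((i:Int) = p.1 ∧ (j:Int) = p.2) := by
          intro hh; exact he (Prod.ext hh.1 hh.2)
        simp [hm, he, this]

lemma segCells_succ (r c dr dc : Int) (k : Nat) :
    segCells r c dr dc (k+1) = (r, c) :: segCells (r+dr) (c+dc) dr dc k := by
  unfold segCells
  rw [List.range_succ_eq_map, List.map_cons, List.map_map]
  refine congrArg₂ _ (by norm_num) (List.map_congr_left ?_)
  intro t _
  simp only [Function.comp_apply, Prod.mk.injEq, Nat.succ_eq_add_one]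
  constructor <;> push_cast <;> ring

lemma seg_eq (k : Nat) (g : List (List String)) (r c dr dc : Int) :
    spiralSeg k g r c dr dc =
      (List.foldl paint g (segCells r c dr dc k), r + k * dr, c + k * dc) := by
  induction k generalizing g r c with
  | zero => simp [spiralSeg, segCells]
  | succ k ih =>
    rw [spiralSeg, ih, segCells_succ]
    simp only [List.foldl_cons, Prod.mk.injEq]
    refine ⟨rfl, ?_, ?_⟩ <;> push_cast <;> ring

lemma loop_succ (fuel : Nat) (g : List (List String)) (r c dr dc steps : Int) :
    spiralLoop (fuel+1) g r c dr dc steps =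
      if steps > 0 then
        spiralLoop fuel (spiralSeg steps.toNat g r c dr dc).1
          ((spiralSeg steps.toNat g r c dr dc).2.1 - dr + dc)
          ((spiralSeg steps.toNat g r c dr dc).2.2 - dc + (-dr)) dc (-dr)
          (if (-dr) == 0 then steps - 1 else steps)
      else g := by
  rw [spiralLoop]

lemma loop_nonpos (fuel : Nat) (g : List (List String)) (r c dr dc steps : Int)
    (h : ¬ steps > 0) : spiralLoop fuel g r c dr dc steps = g := by
  cases fuel with
  | zero => rfl
  | succ f => rw [loop_succ, if_neg h]

lemma loop_eq (m : Nat) : ∀ (fuel : Nat), 2 * m ≤ fuel → ∀ g r c,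
    spiralLoop fuel g r c 0 1 (m : Int) = List.foldl paint g (spiralCells r c m) := by
  induction m using Nat.strong_induction_on with
  | _ m IH =>
  match m with
  | 0 =>
    intro fuel _ g r c
    rw [loop_nonpos]
    · simp [spiralCells]
    · norm_num
  | 1 =>
    intro fuel hf g r c
    obtain ⟨f, rfl⟩ : ∃ f, fuel = f + 1 := ⟨fuel - 1, by omega⟩
    rw [loop_succ, if_pos (by norm_num), seg_eq]
    norm_num
    rw [loop_nonpos]
    · simp [spiralCells, segCells, List.range_succ]
    · norm_num
  | (m+2) =>
    intro fuel hf g r c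
    obtain ⟨f, rfl⟩ : ∃ f, fuel = f + 3 + 1 := ⟨fuel - 4, by omega⟩
    have e2 : ((m+2 : Nat) : Int) = (m:Int) + 2 := by push_cast; ring
    have e3 : ((m+2 : Nat) : Int) - 1 = ((m+1 : Nat) : Int) := by push_cast; ring
    have e4 : ((m+1 : Nat) : Int) - 1 = ((m : Nat) : Int) := by push_cast; ring
    rw [loop_succ, if_pos (by omega), seg_eq]
    norm_num [e3]
    rw [loop_succ, if_pos (by omega), seg_eq]
    norm_num
    rw [loop_succ, if_pos (by omega), seg_eq]
    norm_num [e4]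
    have t1 : ((m:Int)+2).toNat = m+2 := by omega
    have t2 : max ((m:Int)+2) 0 = (m:Int) + 2 := by omega
    have t3 : (m:Int) + 2 - 1 - 1 = (m:Int) := by ring
    have t4 : ((m:Int)+2).toNat - 1 = m + 1 := by omega
    simp only [t1, t2, t3]
    push_cast
    rcases Nat.eq_zero_or_pos m with hm | hm
    · subst hm
      rw [loop_nonpos]
      · simp only [spiralCells, List.foldl_append]
        norm_num [segCells, List.range_succ]
        ring_nf
      · norm_num
    · rw [loop_succ, if_pos (by omega), seg_eq]
      norm_num
      rw [IH m (by omega) f (by omega)]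
      simp only [spiralCells, List.foldl_append]
      ring_nf


lemma mem_segCells (r c dr dc i j : Int) (k : Nat) :
    (i, j) ∈ segCells r c dr dc k ↔
      ∃ t : Nat, t < k ∧ r + (t:Int) * dr = i ∧ c + (t:Int) * dc = j := by
  simp [segCells, List.mem_map, List.mem_range, Prod.ext_iff]

lemma mem_spiralCells (m : Nat) (r c i j : Int) :
    (i, j) ∈ spiralCells r c m ↔ (r ≤ i ∧ i < r + m ∧ c ≤ j ∧ j < c + m) := by
  induction m using Nat.strong_induction_on generalizing r c with
  | _ m IH =>
  match m with
  | 0 => simp [spiralCells]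
  -- placeholder
  | 1 => simp [spiralCells, Prod.ext_iff]; omega
  | (m+2) =>
    simp only [spiralCells, List.mem_append, mem_segCells, IH m (by omega)]
    constructor
    · rintro ((((⟨t,ht,h1,h2⟩|⟨t,ht,h1,h2⟩)|⟨t,ht,h1,h2⟩)|⟨t,ht,h1,h2⟩)|h) <;> push_cast <;> omega
    · intro h
      by_cases hin : r + 1 ≤ i ∧ i < r + 1 + m ∧ c + 1 ≤ j ∧ j < c + 1 + m
      · right; omega
      · left
        push_cast at h
        by_cases hi0 : i = r
        · refine Or.inl (Or.inl (Or.inl ⟨(j - c).toNat, by omega, by omega, by omega⟩))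
        · by_cases hj1 : j = c + (m+2) - 1
          · refine Or.inl (Or.inl (Or.inr ⟨(i - r - 1).toNat, by omega, by omega, by omega⟩))
          · by_cases hi1 : i = r + (m+2) - 1
            · refine Or.inl (Or.inr ⟨(c + (m+2) - 2 - j).toNat, by omega, by omega, by omega⟩)
            · refine Or.inr ⟨(r + (m+2) - 2 - i).toNat, by omega, by omega, by omega⟩


lemma rowsElem {α : Type} (w x : α) (k i : Nat) :
    (w :: (List.replicate k x ++ [w]))[i]? =
      if i = 0 then some w else if i ≤ k then some x else if i = k+1 then some w else none := by
  cases i with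
  | zero => simp
  | succ i =>
    simp only [List.getElem?_cons_succ, List.getElem?_append, List.length_replicate,
      List.getElem?_replicate]
    split_ifs <;> simp_all <;> omega

lemma grid_ext (g h : List (List String)) (hl : g.length = h.length)
    (hc : ∀ i j : Nat, lookup g i j = lookup h i j) : g = h := by
  apply List.ext_getElem?
  intro i
  cases hg : g[i]? with
  | none =>
    have hi : g.length ≤ i := by
      by_contra hlt
      exact absurd hg (by simp [List.getElem?_eq_getElem (by omega : i < g.length)])
    rw [List.getElem?_eq_none (by omega)]
  | some row =>
    have hi : i < g.length := by
      by_contra hlt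
      rw [List.getElem?_eq_none (by omega)] at hg; exact absurd hg (by simp)
    cases hh : h[i]? with
    | none =>
      rw [List.getElem?_eq_none_iff] at hh; omega
    | some row' =>
      refine congrArg some (List.ext_getElem? fun j => ?_)
      have := hc i j
      unfold lookup at this
      rw [hg, hh] at this
      simpa using this

lemma lookup_replicate (N i j : Nat) :
    lookup (List.replicate N (List.replicate N "#")) i j =
      if i < N ∧ j < N then some "#" else none := by
  unfold lookup
  simp only [List.getElem?_replicate]
  split_ifs with h1 h2 h3 <;> simp_all

lemma lookup_rows (w x : List String) (k i j : Nat) :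
    lookup (w :: (List.replicate k x ++ [w])) i j =
      if i = 0 then w[j]? else if i ≤ k then x[j]? else if i = k+1 then w[j]? else none := by
  unfold lookup
  rw [rowsElem]
  split_ifs <;> simp

lemma lookup_B (N i j : Nat) (hN : 5 ≤ N) :
    lookup (List.replicate N "#" ::
        (List.replicate (N-2) ("#" :: (List.replicate (N-2) "." ++ ["#"])) ++
          [List.replicate N "#"])) i j =
      if i < N ∧ j < N then
        (if 1 ≤ i ∧ i ≤ N-2 ∧ 1 ≤ j ∧ j ≤ N-2 then some "." else some "#")
      else none := by
  rw [lookup_rows, rowsElem]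
  simp only [List.getElem?_replicate]
  split_ifs <;> first | rfl | omega

-- the one fact the equivalence rests on: for n ≥ 5 the carved grid is the border grid
lemma main_eq (n : Int) (hn : 5 ≤ n) :
    set2 (spiralLoop (2*n).toNat
        (List.replicate n.toNat (List.replicate n.toNat "#")) 1 1 0 1 (n-2)) 1 1 "." =
      List.replicate n.toNat "#" ::
        (List.replicate (n-2).toNat
            ("#" :: (List.replicate (n-2).toNat "." ++ ["#"])) ++
          [List.replicate n.toNat "#"]) := by
  have e0 : (n-2).toNat = n.toNat - 2 := by omega
  have e1 : n - 2 = ((n.toNat - 2 : Nat) : Int) := by omega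
  rw [e0, e1, loop_eq (n.toNat - 2) (2*n).toNat (by omega)]
  have hsh0 : Shape (List.replicate n.toNat (List.replicate n.toNat "#")) n.toNat := by
    constructor
    · simp
    · intro row hrow
      simp only [List.eq_of_mem_replicate hrow, List.length_replicate]
  have hcells : ∀ p ∈ spiralCells 1 1 (n.toNat - 2),
      0 ≤ p.1 ∧ p.1 < (n.toNat : Int) ∧ 0 ≤ p.2 ∧ p.2 < (n.toNat : Int) := by
    rintro ⟨x, y⟩ hp
    rw [mem_spiralCells] at hp
    push_cast at hp ⊢
    omega
  have hsh : Shape (List.foldl paint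
      (List.replicate n.toNat (List.replicate n.toNat "#")) (spiralCells 1 1 (n.toNat - 2))) n.toNat :=
    shape_foldl_paint _ _ _ hsh0 hcells
  apply grid_ext
  · rw [(shape_set2 _ n.toNat 1 1 "." hsh (by omega) (by omega) (by omega)).1]
    simp
    omega
  · intro i j
    rw [lookup_set2 _ n.toNat 1 1 "." i j hsh (by omega) (by omega) (by omega)
        (by omega),
      lookup_foldl_paint _ _ n.toNat i j hsh0 hcells, lookup_replicate,
      lookup_B n.toNat i j (by omega)]
    have hmem := mem_spiralCells (n.toNat - 2) 1 1 (i:Int) (j:Int)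
    by_cases hm : ((i:Int), (j:Int)) ∈ spiralCells 1 1 (n.toNat - 2)
    · rw [if_pos hm]
      rw [hmem] at hm
      split_ifs <;> first | rfl | omega
    · rw [if_neg hm]
      rw [hmem] at hm
      split_ifs <;> first | rfl | omega

-- ===== VERDICT (by name: the statement is the Claim_ definition above) =====
theorem spiral_room_spec : Claim_equal_spiral_room := by
  intro size _
  unfold Spec_spiral_room spiral_room spiral_room_alt
  apply main_eq
  have h5 : (5:Int) ≤ max 5 size := le_max_left _ _
  split_ifs <;> omega
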